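-- pv_equiv track=rewrite | github.com/Python-Algorithm-Practice/algo-baksal | 재휘/PCCP_2_3_카페_확장.py | get_time_table
-- ===== SOURCE A (Python) =====
-- def get_time_table(menu, order, k):
--     # 입장 시각 설정
--     time_table = [[idx * k, None] for idx in range(len(order))]
--
--     # 퇴장 시각 설정
--     time_table[0][1] = menu[order[0]]  # 첫 사람 음료는 주문 직후 제조하므로 냅다 설정해 버리기
--     for idx in range(1, len(order)):
--         # idx 번째 사람의 입장 시각과 직전 사람의 퇴장 시각 중 더 늦는 시각을 기준으로 하기
--         time_table[idx][1] = max(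
--             time_table[idx - 1][1],
--             time_table[idx][0]
--         ) + menu[order[idx]]
--
--     return time_table
-- ===== SOURCE B (Python) =====
-- def get_time_table(menu, order, k):
--     # Max-plus closed form: exit[i] = P[i] + max_{0<=j<=i} (j*k - P[j-1]),
--     # maintained with a prefix sum P and a running maximum M in one pass.
--     durations = [menu[name] for name in order]
--     result = []
--     prefix = 0
--     best = 0  # max over j<=i of (j*k - prefix-before-j); j=0 term is 0
--     for i, d in enumerate(durations):
--         if i * k - prefix > best:
--             best = i * k - prefix
--         prefix += d
--         result.append([i * k, prefix + best])
--     return result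
-- ===== Notes on version B (the rewrite author's own statement) =====
-- stated objective: alternative
-- what changed: Replaces A's prev-exit recurrence exit[i]=max(exit[i-1], i*k)+dur[i] with the max-plus closed form exit[i]=P[i]+max_j(j*k-P[j-1]), computed in one pass via a prefix sum and a running maximum.
import Mathlib
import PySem

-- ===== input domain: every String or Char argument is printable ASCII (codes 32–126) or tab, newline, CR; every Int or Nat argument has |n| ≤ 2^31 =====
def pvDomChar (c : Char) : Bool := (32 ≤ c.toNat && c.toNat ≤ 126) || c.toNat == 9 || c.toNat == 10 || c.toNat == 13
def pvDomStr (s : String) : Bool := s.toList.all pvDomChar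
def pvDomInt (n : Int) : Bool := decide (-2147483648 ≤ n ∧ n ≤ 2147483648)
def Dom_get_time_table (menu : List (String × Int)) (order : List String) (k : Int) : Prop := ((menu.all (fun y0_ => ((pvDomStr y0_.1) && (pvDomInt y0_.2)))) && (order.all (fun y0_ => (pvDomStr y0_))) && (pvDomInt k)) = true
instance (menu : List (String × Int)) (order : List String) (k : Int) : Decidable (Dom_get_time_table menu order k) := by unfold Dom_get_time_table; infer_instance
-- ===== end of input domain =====

-- B replaces A's prev-exit recurrence with a pfx-sum + running-max (max-plus closed form) pass; same O(n) cost.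
-- Equivalence is about the return value; A raises on empty order or a missing menu key (excluded by Pre_).

-- ===== PORT A =====
-- menu[name] (KeyError excluded by Pre_; the default is never reached inside Pre_)
def pvMenuGet (menu : List (String × Int)) (name : String) : Int :=
  ((PySem.Dict.mk menu).get? name).getD 0

-- the 'for idx in range(1, len(order))' loop, carrying the previous exit time
def pvALoop (menu : List (String × Int)) (k : Int) : List String → Int → Int → List (List Int)
  | [], _, _ => []
  | name :: rest, idx, prevExit =>
      let e := max prevExit (idx * k) + pvMenuGet menu name
      [idx * k, e] :: pvALoop menu k rest (idx + 1) e

def get_time_table (menu : List (String × Int)) (order : List String) (k : Int) : List (List Int) :=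
  match order with
  | [] => []   -- Python raises IndexError here (time_table[0]); excluded by Pre_
  | first :: rest =>
      let e0 := pvMenuGet menu first          -- time_table[0][1] = menu[order[0]]
      [0 * k, e0] :: pvALoop menu k rest 1 e0

-- ===== PORT B =====
-- one pass over the durations with state (i, pfx, best)
def pvBLoop (k : Int) : List Int → Int → Int → Int → List (List Int)
  | [], _, _, _ => []
  | d :: rest, i, pfx, best =>
      let best' := if i * k - pfx > best then i * k - pfx else best
      let pfx' := pfx + d
      [i * k, pfx' + best'] :: pvBLoop k rest (i + 1) pfx' best'

def get_time_table_alt (menu : List (String × Int)) (order : List String) (k : Int) : List (List Int) :=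
  pvBLoop k (order.map (fun name => pvMenuGet menu name)) 0 0 0

-- ===== PRECONDITION & SPEC =====
-- Pre_ excludes exactly the inputs where Python A raises: empty order (IndexError) and
-- order items missing from menu (KeyError).
def Pre_get_time_table (menu : List (String × Int)) (order : List String) (k : Int) : Prop :=
  order ≠ [] ∧ ∀ name ∈ order, ((PySem.Dict.mk menu).get? name).isSome
instance (menu : List (String × Int)) (order : List String) (k : Int) : Decidable (Pre_get_time_table menu order k) := by unfold Pre_get_time_table; infer_instance

def pvWitness_get_time_table : (List (String × Int)) × List String × Int :=
  ([("coffee", 2), ("tea", 5)], ["tea", "coffee", "tea"], 3)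

def Spec_get_time_table (menu : List (String × Int)) (order : List String) (k : Int) (out : List (List Int)) : Prop := out = get_time_table_alt menu order k
instance (menu : List (String × Int)) (order : List String) (k : Int) (out : List (List Int)) : Decidable (Spec_get_time_table menu order k out) := by unfold Spec_get_time_table; infer_instance

-- ===== CLAIM (what is proved, stated in full; the proofs are below) =====
def Claim_equal_get_time_table : Prop := ∀ (menu : List (String × Int)) (order : List String) (k : Int), Dom_get_time_table menu order k → Pre_get_time_table menu order k → Spec_get_time_table menu order k (get_time_table menu order k)

-- ===== LEMMAS AND PROOFS =====

-- Loop invariant: A's previous exit time equals B's pfx + best.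
theorem pvLoop_eq (menu : List (String × Int)) (k : Int) :
    ∀ (names : List String) (i pfx best : Int),
      pvALoop menu k names i (pfx + best)
        = pvBLoop k (names.map (fun name => pvMenuGet menu name)) i pfx best := by
  intro names
  induction names with
  | nil => intro i pfx best; rfl
  | cons name rest ih =>
      intro i pfx best
      simp only [pvALoop, pvBLoop, List.map]
      have harith : max (pfx + best) (i * k) + pvMenuGet menu name
          = (pfx + pvMenuGet menu name)
            + (if i * k - pfx > best then i * k - pfx else best) := by
        split_ifs with h <;> omega
      rw [harith, ih]

-- ===== VERDICT (by name: the statement is the Claim_ definition above) =====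
theorem get_time_table_spec : Claim_equal_get_time_table := by
  intro menu order k _hdom hpre
  unfold Spec_get_time_table get_time_table get_time_table_alt
  obtain ⟨hne, _⟩ := hpre
  match order with
  | [] => exact absurd rfl hne
  | first :: rest =>
      simp only [List.map]
      rw [show (0 : Int) * k = 0 * k from rfl]
      have h0 : pvBLoop k (pvMenuGet menu first :: rest.map (fun name => pvMenuGet menu name)) 0 0 0
          = [0 * k, pvMenuGet menu first] :: pvBLoop k (rest.map (fun name => pvMenuGet menu name)) 1 (pvMenuGet menu first) 0 := by
        simp only [pvBLoop]
        norm_num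
      rw [h0]
      have := pvLoop_eq menu k rest 1 (pvMenuGet menu first) 0
      rw [add_zero] at this
      rw [this]
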